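-- pv_equiv track=rewrite | github.com/hedb/misc_py | fox_and_hounds.py | check_if_f1_after_hound
-- ===== SOURCE A (Python) =====
-- def check_if_f1_after_hound(arr):
--     ret = False
--     is_previous_is_hound = False
--     for x in arr:
--         if x == 'f1' and is_previous_is_hound:
--             ret = True; break
--         is_previous_is_hound = x == 'h'
--     return ret
-- ===== SOURCE B (Python) =====
-- def check_if_f1_after_hound(arr):
--     hs = [i for i, x in enumerate(arr) if x == 'h']
--     return any(i + 1 < len(arr) and arr[i + 1] == 'f1' for i in hs)
-- ===== Notes on version B (the rewrite author's own statement) =====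
-- stated objective: idiomatic
-- what changed: Replaces the stateful flag-carrying single pass (break/early-exit loop tracking 'previous was h') with a two-pass decomposition: collect the indices of 'h' entries, then test whether any is directly followed by 'f1'.
import Mathlib
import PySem

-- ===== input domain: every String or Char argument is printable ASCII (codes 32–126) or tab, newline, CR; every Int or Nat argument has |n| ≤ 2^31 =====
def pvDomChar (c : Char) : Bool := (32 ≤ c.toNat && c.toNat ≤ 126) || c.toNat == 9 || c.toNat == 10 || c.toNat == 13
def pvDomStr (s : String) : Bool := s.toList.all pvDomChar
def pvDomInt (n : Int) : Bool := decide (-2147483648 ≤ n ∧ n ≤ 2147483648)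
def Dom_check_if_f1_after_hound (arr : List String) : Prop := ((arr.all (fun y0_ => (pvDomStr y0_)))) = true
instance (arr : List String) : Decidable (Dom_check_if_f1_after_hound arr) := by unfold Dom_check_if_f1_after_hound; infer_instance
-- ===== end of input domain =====

-- B is an idiomatic two-pass decomposition (collect 'h' indices, then check followers)
-- replacing A's flag-carrying single pass; return values are identical on all inputs.

-- ===== PORT A =====
-- A's loop with early break, carrying (ret implicit via return) the 'previous was h' flag.
def pvALoop : List String → Bool → Bool
  | [], _ => false
  | x :: xs, prev => if x == "f1" && prev then true else pvALoop xs (x == "h")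

def check_if_f1_after_hound (arr : List String) : Bool :=
  pvALoop arr false

-- ===== PORT B =====
def check_if_f1_after_hound_alt (arr : List String) : Bool :=
  let hs := ((PySem.List.enumerate arr).filter (fun p => p.2 == "h")).map Prod.fst
  hs.any (fun i => decide (i + 1 < (arr.length : Int)) && (PySem.List.pyGetD arr (i + 1) "" == "f1"))

-- ===== PRECONDITION & SPEC =====
def Spec_check_if_f1_after_hound (arr : List String) (out : Bool) : Prop := out = check_if_f1_after_hound_alt arr
instance (arr : List String) (out : Bool) : Decidable (Spec_check_if_f1_after_hound arr out) := by unfold Spec_check_if_f1_after_hound; infer_instance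

-- ===== CLAIM (what is proved, stated in full; the proofs are below) =====
def Claim_equal_check_if_f1_after_hound : Prop := ∀ (arr : List String), Dom_check_if_f1_after_hound arr → Spec_check_if_f1_after_hound arr (check_if_f1_after_hound arr)

-- ===== LEMMAS AND PROOFS =====

-- the common characterization: some adjacent pair ("h", "f1")
def pvPairProp (arr : List String) : Prop :=
  ∃ k : Nat, arr[k]? = some "h" ∧ arr[k + 1]? = some "f1"

theorem pvALoop_iff (arr : List String) :
    ∀ prev : Bool, pvALoop arr prev = true ↔
      ((prev = true ∧ arr[0]? = some "f1") ∨ pvPairProp arr) := by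
  induction arr with
  | nil =>
    intro prev
    simp [pvALoop, pvPairProp]
  | cons x t ih =>
    intro prev
    simp only [pvALoop]
    constructor
    · intro h
      split at h
      · rename_i hc
        simp only [Bool.and_eq_true, beq_iff_eq] at hc
        left
        simp [hc.1, hc.2]
      · rcases (ih (x == "h")).mp h with ⟨hh, hf⟩ | ⟨k, hk, hk1⟩
        · right
          refine ⟨0, ?_, ?_⟩
          · simpa using hh
          · simpa using hf
        · right
          exact ⟨k + 1, by simpa using hk, by simpa using hk1⟩
    · intro h
      rcases h with ⟨hp, hf⟩ | ⟨k, hk, hk1⟩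
      · simp only [List.getElem?_cons_zero, Option.some.injEq] at hf
        simp [hf, hp]
      · split
        · rfl
        · apply (ih (x == "h")).mpr
          cases k with
          | zero =>
            simp only [List.getElem?_cons_zero, Option.some.injEq] at hk
            left
            exact ⟨by simp [hk], by simpa using hk1⟩
          | succ m =>
            right
            exact ⟨m, by simpa using hk, by simpa using hk1⟩

theorem pvAlt_iff (arr : List String) :
    check_if_f1_after_hound_alt arr = true ↔ pvPairProp arr := by
  simp only [check_if_f1_after_hound_alt, List.any_eq_true, List.mem_map, List.mem_filter,
    PySem.List.mem_enumerate_iff, pvPairProp]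
  constructor
  · rintro ⟨i, ⟨p, ⟨⟨k, hklt, rfl⟩, hh⟩, rfl⟩, hcond⟩
    simp only [beq_iff_eq] at hh
    simp only [Bool.and_eq_true, decide_eq_true_eq, beq_iff_eq] at hcond
    obtain ⟨hlt, hval⟩ := hcond
    have hk1 : k + 1 < arr.length := by
      simp only [zero_add] at hlt
      omega
    refine ⟨k, ?_, ?_⟩
    · simp [List.getElem?_eq_getElem hklt, hh]
    · rw [List.getElem?_eq_getElem hk1]
      have h0 : (0 : Int) + (k : Int) + 1 = ((k + 1 : Nat) : Int) := by push_cast; ring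
      rw [← hval, h0, PySem.List.pyGetD_natCast, List.getD_eq_getElem?_getD,
        List.getElem?_eq_getElem hk1]
      rfl
  · rintro ⟨k, hk, hk1⟩
    have hklt : k < arr.length := (List.getElem?_eq_some_iff.mp hk).1
    have hk1lt : k + 1 < arr.length := (List.getElem?_eq_some_iff.mp hk1).1
    have hkv : arr[k] = "h" := by simpa [List.getElem?_eq_getElem hklt] using hk
    have hk1v : arr[k + 1] = "f1" := by simpa [List.getElem?_eq_getElem hk1lt] using hk1
    refine ⟨(0 : Int) + (k : Int),
      ⟨((0 : Int) + (k : Int), arr[k]), ⟨⟨k, hklt, rfl⟩, by simp [hkv]⟩, rfl⟩, ?_⟩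
    rw [Bool.and_eq_true]
    refine ⟨by simp only [decide_eq_true_eq]; omega, ?_⟩
    have h0 : (0 : Int) + (k : Int) + 1 = ((k + 1 : Nat) : Int) := by push_cast; ring
    rw [h0, PySem.List.pyGetD_natCast, List.getD_eq_getElem?_getD,
      List.getElem?_eq_getElem hk1lt]
    simp [hk1v]

-- ===== VERDICT (by name: the statement is the Claim_ definition above) =====
theorem check_if_f1_after_hound_spec : Claim_equal_check_if_f1_after_hound := by
  intro arr _
  unfold Spec_check_if_f1_after_hound check_if_f1_after_hound
  rw [Bool.eq_iff_iff, pvALoop_iff arr false, pvAlt_iff arr]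
  simp
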